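-- pv_equiv track=rewrite | github.com/0xdeadbeef0x/APG | C4Audits.py | getSeverityFromLables
-- ===== SOURCE A (Python) =====
-- def getSeverityFromLables(data):
--     severity = ""
--     for label in data['labels']:
--         if label["name"].startswith("3"):
--             severity = "[HIGH]"
--         elif label["name"].startswith("2"):
--             severity = "[MEDIUM]"
--         elif label["name"].startswith("QA"):
--             severity = "[QA]"
--     return severity
-- ===== SOURCE B (Python) =====
-- def getSeverityFromLables(data):
--     for label in reversed(data['labels']):
--         name = label["name"]
--         if name.startswith("3"):
--             return "[HIGH]"
--         if name.startswith("2"):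
--             return "[MEDIUM]"
--         if name.startswith("QA"):
--             return "[QA]"
--     return ""
-- ===== Notes on version B (the rewrite author's own statement) =====
-- stated objective: idiomatic
-- what changed: Replaces the accumulating full forward pass with an early-exit reverse scan that returns the severity of the first matching label from the end (the same label whose match A keeps last).
import Mathlib
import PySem

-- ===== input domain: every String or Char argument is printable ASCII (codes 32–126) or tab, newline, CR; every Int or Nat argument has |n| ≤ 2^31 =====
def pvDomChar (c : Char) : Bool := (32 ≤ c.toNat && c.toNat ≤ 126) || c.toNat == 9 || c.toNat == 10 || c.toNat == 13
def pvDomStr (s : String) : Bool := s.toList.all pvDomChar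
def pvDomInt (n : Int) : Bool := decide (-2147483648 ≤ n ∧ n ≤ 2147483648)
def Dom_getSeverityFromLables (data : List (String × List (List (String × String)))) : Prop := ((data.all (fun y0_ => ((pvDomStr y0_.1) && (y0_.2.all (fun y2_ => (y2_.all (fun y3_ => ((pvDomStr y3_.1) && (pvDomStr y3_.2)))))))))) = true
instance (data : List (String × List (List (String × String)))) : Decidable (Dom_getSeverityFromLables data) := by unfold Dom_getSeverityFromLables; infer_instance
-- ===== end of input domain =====

-- ===== PORT A =====
-- B changes the traversal: A folds forward accumulating the last match; B scans in reverse and early-returns on the first match.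
def getSeverityFromLables (data : List (String × List (List (String × String)))) : String :=
  (PySem.Dict.getD (PySem.Dict.mk data) "labels" []).foldl
    (fun severity label =>
      if PySem.Str.startswith (PySem.Dict.getD (PySem.Dict.mk label) "name" "") "3" then "[HIGH]"
      else if PySem.Str.startswith (PySem.Dict.getD (PySem.Dict.mk label) "name" "") "2" then "[MEDIUM]"
      else if PySem.Str.startswith (PySem.Dict.getD (PySem.Dict.mk label) "name" "") "QA" then "[QA]"
      else severity) ""

-- ===== PORT B =====
def pvAltFind : List (List (String × String)) → String
  | [] => ""
  | label :: rest =>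
    let name := PySem.Dict.getD (PySem.Dict.mk label) "name" ""
    if PySem.Str.startswith name "3" then "[HIGH]"
    else if PySem.Str.startswith name "2" then "[MEDIUM]"
    else if PySem.Str.startswith name "QA" then "[QA]"
    else pvAltFind rest

def getSeverityFromLables_alt (data : List (String × List (List (String × String)))) : String :=
  pvAltFind (PySem.Dict.getD (PySem.Dict.mk data) "labels" []).reverse

-- ===== PRECONDITION & SPEC =====
-- Pre_ excludes exactly the inputs on which the Python A raises KeyError: a missing 'labels' key, or a label dict without a 'name' key.
def Pre_getSeverityFromLables (data : List (String × List (List (String × String)))) : Prop :=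
  (PySem.Dict.get? (PySem.Dict.mk data) "labels").isSome = true ∧
  ∀ label ∈ PySem.Dict.getD (PySem.Dict.mk data) "labels" [], (PySem.Dict.get? (PySem.Dict.mk label) "name").isSome = true
instance (data : List (String × List (List (String × String)))) : Decidable (Pre_getSeverityFromLables data) := by unfold Pre_getSeverityFromLables; infer_instance
def pvWitness_getSeverityFromLables : (List (String × List (List (String × String)))) :=
  [("labels", [[("name", "2 medium")], [("name", "QA check")]])]
def Spec_getSeverityFromLables (data : List (String × List (List (String × String)))) (out : String) : Prop := out = getSeverityFromLables_alt data
instance (data : List (String × List (List (String × String)))) (out : String) : Decidable (Spec_getSeverityFromLables data out) := by unfold Spec_getSeverityFromLables; infer_instance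

-- ===== CLAIM (what is proved, stated in full; the proofs are below) =====
def Claim_equal_getSeverityFromLables : Prop := ∀ (data : List (String × List (List (String × String)))), Dom_getSeverityFromLables data → Pre_getSeverityFromLables data → Spec_getSeverityFromLables data (getSeverityFromLables data)

-- ===== LEMMAS AND PROOFS =====
lemma pv_fold_eq_find (xs : List (List (String × String))) (acc : String) :
    xs.foldl
      (fun severity label =>
        if PySem.Str.startswith (PySem.Dict.getD (PySem.Dict.mk label) "name" "") "3" then "[HIGH]"
        else if PySem.Str.startswith (PySem.Dict.getD (PySem.Dict.mk label) "name" "") "2" then "[MEDIUM]"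
        else if PySem.Str.startswith (PySem.Dict.getD (PySem.Dict.mk label) "name" "") "QA" then "[QA]"
        else severity) acc
      = (if pvAltFind xs.reverse = "" then acc else pvAltFind xs.reverse) := by
  induction xs using List.reverseRecOn generalizing acc with
  | nil => simp [pvAltFind]
  | append_singleton ys y ih =>
      simp only [List.foldl_append, List.foldl_cons, List.foldl_nil, List.reverse_append,
        List.reverse_singleton, List.singleton_append, pvAltFind, ih]
      split_ifs <;> simp_all

-- ===== VERDICT (by name: the statement is the Claim_ definition above) =====
theorem getSeverityFromLables_spec : Claim_equal_getSeverityFromLables := by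
  intro data _ _
  show getSeverityFromLables data = getSeverityFromLables_alt data
  unfold getSeverityFromLables getSeverityFromLables_alt
  rw [pv_fold_eq_find]
  split_ifs with h <;> simp [h]
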